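-- pv_equiv track=rewrite | github.com/Mobeenahmedmehr/Hackathon-0 | auditor/task_analyzer.py | extract_agent_used
-- ===== SOURCE A (Python) =====
-- def extract_agent_used(content: str) -> str:
--     """Extract agent used from content"""
--     # Look for agent indicators in the content
--     lines = content.split('\n')
--     for line in lines[:15]:  # Check first 15 lines for agent indicators
--         if 'agent' in line.lower():
--             parts = line.split()
--             for i, part in enumerate(parts):
--                 if 'agent' in part.lower() and i + 1 < len(parts):
--                     return parts[i + 1].strip('.,!?')
--
--     return 'Unknown'
-- ===== SOURCE B (Python) =====
-- def extract_agent_used(content: str) -> str: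
--     """Extract agent used from content: one streaming pass over the characters,
--     with a small state machine (current token, pending flag, newline counter)
--     instead of splitting into lines and words."""
--     tok = ''
--     pending = False
--     newlines = 0
--     for ch in content + '\n':
--         if ch.isspace():
--             if tok:
--                 if pending:
--                     return tok.strip('.,!?')
--                 pending = 'agent' in tok.lower()
--                 tok = ''
--             if ch == '\n':
--                 pending = False
--                 newlines += 1
--                 if newlines == 15:
--                     break
--         else:
--             tok += ch
--     return 'Unknown'
-- ===== Notes on version B (the rewrite author's own statement) =====
-- stated objective: alternative
-- what changed: B replaces A's line-splitting and per-line word-splitting with nested index loops by a single streaming pass over the characters: a state machine keeps the current token, a flag recording whether the previous token of the line mentioned the keyword, and a newline counter, returning as soon as a token follows a keyword token; no line list or word list is ever built.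
import Mathlib
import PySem

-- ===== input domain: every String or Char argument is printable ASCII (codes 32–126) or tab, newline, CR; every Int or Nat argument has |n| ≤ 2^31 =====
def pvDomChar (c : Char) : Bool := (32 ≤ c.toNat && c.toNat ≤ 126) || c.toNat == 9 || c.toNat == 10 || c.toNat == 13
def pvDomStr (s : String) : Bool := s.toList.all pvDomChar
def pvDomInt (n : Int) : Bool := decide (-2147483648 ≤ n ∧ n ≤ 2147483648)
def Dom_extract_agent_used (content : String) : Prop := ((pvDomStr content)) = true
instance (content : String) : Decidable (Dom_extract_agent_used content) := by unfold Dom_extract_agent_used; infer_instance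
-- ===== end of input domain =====

-- B replaces A's line/word splitting with nested loops by a single streaming pass
-- over the characters with a token/flag/newline-counter state machine (alternative; same cost).


-- ===== PORT A =====
-- inner loop: 'for i, part in enumerate(parts): if "agent" in part.lower() and i+1 < len(parts): return parts[i+1].strip(".,!?")'
def pvInnerA (parts : List String) : Nat → List String → Option String
  | _, [] => none
  | i, part :: rest =>
    if PySem.Str.isIn "agent" (PySem.Str.lower part) && decide (i + 1 < parts.length) then
      some (PySem.Str.stripChars ((PySem.List.pyGet? parts ((i : Int) + 1)).getD "") ".,!?")
    else pvInnerA parts (i + 1) rest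

-- outer loop over lines[:15]
def pvOuterA : List String → String
  | [] => "Unknown"
  | line :: rest =>
    if PySem.Str.isIn "agent" (PySem.Str.lower line) then
      match pvInnerA (PySem.Str.split₀ line) 0 (PySem.Str.split₀ line) with
      | some r => r
      | none => pvOuterA rest
    else pvOuterA rest

def extract_agent_used (content : String) : String :=
  pvOuterA (PySem.List.slice ((PySem.Str.split? content "\n").getD []) none (some 15))

-- ===== PORT B =====
-- Source B's single for-loop over the characters of content + '\n'; state = (tok, pending, newlines).
-- tok is accumulated reversed (tok.reverse is the Python string built by 'tok += ch');
-- 'some r' = the early return, 'none' = falling through / break to "return 'Unknown'".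
def pvRunB : List Char → List Char → Bool → Nat → Option String
  | [], _, _, _ => none
  | c :: rest, tok, pending, nl =>
    if PySem.Chars.isspace c then
      if tok.isEmpty then
        if c = '\n' then
          if nl + 1 = 15 then none else pvRunB rest tok false (nl + 1)
        else pvRunB rest tok pending nl
      else
        if pending then some (PySem.Str.stripChars (String.ofList tok.reverse) ".,!?")
        else
          if c = '\n' then
            if nl + 1 = 15 then none else pvRunB rest [] false (nl + 1)
          else pvRunB rest [] (PySem.Str.isIn "agent" (PySem.Str.lower (String.ofList tok.reverse))) nl
    else pvRunB rest (c :: tok) pending nl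

def extract_agent_used_alt (content : String) : String :=
  match pvRunB (content.toList ++ ['\n']) [] false 0 with
  | some r => r
  | none => "Unknown"

-- ===== PRECONDITION & SPEC =====
def Spec_extract_agent_used (content : String) (out : String) : Prop := out = extract_agent_used_alt content
instance (content : String) (out : String) : Decidable (Spec_extract_agent_used content out) := by unfold Spec_extract_agent_used; infer_instance

-- ===== CLAIM (what is proved, stated in full; the proofs are below) =====
def Claim_equal_extract_agent_used : Prop := ∀ (content : String), Dom_extract_agent_used content → Spec_extract_agent_used content (extract_agent_used content)

-- ===== LEMMAS AND PROOFS =====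

-- 'agent' in t.lower(), at the char level
def pvAg (t : List Char) : Bool := PySem.Chars.isIn "agent".toList (PySem.Chars.lower t)

def pvStripW (w : List Char) : String := PySem.Str.stripChars (String.ofList w) ".,!?"

-- the String-level agent test on an ofList token is pvAg
lemma pv_ag_ofList (t : List Char) :
    PySem.Str.isIn "agent" (PySem.Str.lower (String.ofList t)) = pvAg t := by
  simp [PySem.Str.isIn, PySem.Str.lower, pvAg]


-- splitting on '\n', directly recursive
def pvSplitNL : List Char → List (List Char)
  | [] => [[]]
  | c :: rest =>
    if c = '\n' then [] :: pvSplitNL rest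
    else match pvSplitNL rest with
         | [] => [[c]]
         | l :: ls => (c :: l) :: ls

def pvConsHead (p : List Char) : List (List Char) → List (List Char)
  | [] => [p]
  | l :: ls => (p ++ l) :: ls

-- scan a token list carrying the pending flag (previous token mentioned the keyword)
def pvScanToksC : List (List Char) → Bool → Option (List Char)
  | [], _ => none
  | t :: ts, p => if p then some t else pvScanToksC ts (pvAg t)

-- the first token following an agent token (A's inner loop, char level)
def pvPairScanC : List (List Char) → Option (List Char)
  | [] => none
  | [_] => none
  | p :: q :: rest => if pvAg p then some q else pvPairScanC (q :: rest)

-- A's inner loop over Strings, as a pair scan (proof middle form)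
def pvPairScan : List String → Option String
  | [] => none
  | [_] => none
  | p :: q :: rest =>
    if PySem.Str.isIn "agent" (PySem.Str.lower p) then some q else pvPairScan (q :: rest)

-- B's state machine restricted to one line (no '\n' reset, no counter)
def pvLineScan : List Char → List Char → Bool → Option (List Char)
  | [], tok, p => if !tok.isEmpty && p then some tok.reverse else none
  | c :: cs, tok, p =>
    if PySem.Chars.isspace c then
      if tok.isEmpty then pvLineScan cs tok p
      else if p then some tok.reverse
      else pvLineScan cs [] (pvAg tok.reverse)
    else pvLineScan cs (c :: tok) p

-- first hit over a list of lines
def pvFirstC : List (List Char) → Option (List Char)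
  | [] => none
  | l :: rest =>
    match pvScanToksC (PySem.Chars.split₀ l) false with
    | some w => some w
    | none => pvFirstC rest

lemma pvSplitNL_ne_nil (cs : List Char) : pvSplitNL cs ≠ [] := by
  cases cs with
  | nil => simp [pvSplitNL]
  | cons c rest =>
    simp only [pvSplitNL]
    split_ifs
    · simp
    · cases pvSplitNL rest <;> simp

lemma pvConsHead_nil (ls : List (List Char)) (h : ls ≠ []) : pvConsHead [] ls = ls := by
  cases ls with
  | nil => exact absurd rfl h
  | cons l ls => simp [pvConsHead]

-- CPython's splitOn('\n') is pvSplitNL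
lemma pv_splitOn_go_char (l : List Char) :
    ∀ (cur : List Char) (acc : List (List Char)) (fuel : Nat), l.length < fuel →
      PySem.Chars.splitOn.go ['\n'] fuel l cur acc =
        acc.reverse ++ pvConsHead cur.reverse (pvSplitNL l) := by
  induction l with
  | nil =>
    intro cur acc fuel hf
    match fuel, hf with
    | fuel + 1, _ => simp [PySem.Chars.splitOn.go, pvSplitNL, pvConsHead]
  | cons c rest ih =>
    intro cur acc fuel hf
    match fuel, hf with
    | fuel + 1, hf =>
      have hrest : rest.length < fuel := by simp at hf; omega
      by_cases hc : c = '\n'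
      · subst hc
        have hpre : List.isPrefixOf ['\n'] ('\n' :: rest) = true := by
          simp [List.isPrefixOf]
        simp only [PySem.Chars.splitOn.go, hpre, if_pos]
        rw [show List.drop (['\n'] : List Char).length ('\n' :: rest) = rest by simp]
        rw [ih [] (cur.reverse :: acc) fuel hrest]
        rw [show ([] : List Char).reverse = [] from rfl,
            pvConsHead_nil _ (pvSplitNL_ne_nil rest)]
        simp [pvSplitNL, pvConsHead]
      · have hpre : List.isPrefixOf ['\n'] (c :: rest) = false := by
          simp [List.isPrefixOf]
          intro h; exact absurd h.symm hc
        simp only [PySem.Chars.splitOn.go, hpre]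
        rw [if_neg (by simp)]
        rw [ih (c :: cur) acc fuel hrest]
        simp only [pvSplitNL, if_neg hc]
        cases h' : pvSplitNL rest with
        | nil => exact absurd h' (pvSplitNL_ne_nil rest)
        | cons l ls => simp [pvConsHead]

lemma pv_splitOn_nl (cs : List Char) :
    PySem.Chars.splitOn cs ['\n'] = pvSplitNL cs := by
  unfold PySem.Chars.splitOn
  rw [pv_splitOn_go_char cs [] [] (cs.length + 1) (by omega)]
  simp [pvConsHead_nil _ (pvSplitNL_ne_nil cs)]

-- re-joining the lines with '\n' gives back the characters (plus the final '\n')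
lemma pvSplitNL_flat (cs : List Char) :
    (pvSplitNL cs).flatMap (fun l => l ++ ['\n']) = cs ++ ['\n'] := by
  induction cs with
  | nil => simp [pvSplitNL]
  | cons c rest ih =>
    simp only [pvSplitNL]
    split_ifs with hc
    · subst hc; simp [List.flatMap_cons, ih]
    · cases h' : pvSplitNL rest with
      | nil => exact absurd h' (pvSplitNL_ne_nil rest)
      | cons l ls =>
        rw [h'] at ih
        simp only [List.flatMap_cons] at ih ⊢
        simp [← ih]

-- no line produced by pvSplitNL contains '\n'
lemma pvSplitNL_no_nl (cs : List Char) : ∀ t ∈ pvSplitNL cs, '\n' ∉ t := by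
  induction cs with
  | nil => simp [pvSplitNL]
  | cons c rest ih =>
    intro t ht
    simp only [pvSplitNL] at ht
    split_ifs at ht with hc
    · rcases List.mem_cons.mp ht with h | h
      · simp [h]
      · exact ih t h
    · cases h' : pvSplitNL rest with
      | nil => exact absurd h' (pvSplitNL_ne_nil rest)
      | cons l ls =>
        rw [h'] at ht
        rcases List.mem_cons.mp ht with h | h
        · subst h
          intro hmem
          rcases List.mem_cons.mp hmem with h | h
          · exact hc h.symm
          · exact ih l (h' ▸ List.mem_cons_self) h
        · exact ih t (h' ▸ List.mem_cons_of_mem _ h)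

-- split₀.go: the accumulator is a prefix of the result
lemma pv_split0_go_acc (cs : List Char) :
    ∀ (cur : List Char) (acc : List (List Char)),
      PySem.Chars.split₀.go cs cur acc = acc.reverse ++ PySem.Chars.split₀.go cs cur [] := by
  induction cs with
  | nil =>
    intro cur acc
    simp only [PySem.Chars.split₀.go]
    split_ifs <;> simp
  | cons c rest ih =>
    intro cur acc
    simp only [PySem.Chars.split₀.go]
    split_ifs with hsp hc
    · exact ih [] acc
    · rw [ih [] (cur.reverse :: acc), ih [] [cur.reverse]]
      simp
    · exact ih (c :: cur) acc

-- B's one-line machine = flag scan of the line's split() tokens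
lemma pv_lineScan_eq_scanToks (cs : List Char) :
    ∀ (tok : List Char) (p : Bool),
      pvLineScan cs tok p = pvScanToksC (PySem.Chars.split₀.go cs tok []) p := by
  induction cs with
  | nil =>
    intro tok p
    cases tok with
    | nil => simp [pvLineScan, PySem.Chars.split₀.go, pvScanToksC]
    | cons a t => cases p <;> simp [pvLineScan, PySem.Chars.split₀.go, pvScanToksC]
  | cons c rest ih =>
    intro tok p
    by_cases hsp : PySem.Chars.isspace c = true
    · cases tok with
      | nil => simpa [pvLineScan, PySem.Chars.split₀.go, hsp] using ih [] p
      | cons a t =>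
        cases p with
        | true =>
          simp [pvLineScan, PySem.Chars.split₀.go, hsp, pvScanToksC,
                pv_split0_go_acc rest [] [t.reverse ++ [a]]]
        | false =>
          have h := ih [] (pvAg (t.reverse ++ [a]))
          simp [pvLineScan, PySem.Chars.split₀.go, hsp, pvScanToksC,
                pv_split0_go_acc rest [] [t.reverse ++ [a]], h]
    · simpa [pvLineScan, PySem.Chars.split₀.go, hsp] using ih (c :: tok) p

-- the flag scan is A's pair scan
lemma pv_scanToks_eq_pairScan (ts : List (List Char)) :
    ∀ b, pvScanToksC ts b = if b then ts.head? else pvPairScanC ts := by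
  induction ts with
  | nil => intro b; cases b <;> simp [pvScanToksC, pvPairScanC]
  | cons t ts ih =>
    intro b
    cases b with
    | true => simp [pvScanToksC]
    | false =>
      rw [show pvScanToksC (t :: ts) false = pvScanToksC ts (pvAg t) from by
            simp [pvScanToksC]]
      rw [ih (pvAg t)]
      cases ts with
      | nil => cases pvAg t <;> simp [pvPairScanC]
      | cons q rest => cases h : pvAg t <;> simp [h, pvPairScanC]

-- B's loop over (line ++ '\n' ++ rest)
lemma pv_runB_line (cs : List Char) (hnl : '\n' ∉ cs) :
    ∀ (rest tok : List Char) (p : Bool) (nl : Nat),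
      pvRunB (cs ++ '\n' :: rest) tok p nl =
        match pvLineScan cs tok p with
        | some w => some (pvStripW w)
        | none => if nl + 1 = 15 then none else pvRunB rest [] false (nl + 1) := by
  induction cs with
  | nil =>
    intro rest tok p nl
    cases tok with
    | nil => simp [pvRunB, pvLineScan, show PySem.Chars.isspace '\n' = true from rfl]
    | cons a t =>
      cases p <;>
        simp [pvRunB, pvLineScan, pvStripW, show PySem.Chars.isspace '\n' = true from rfl]
  | cons c cs ih =>
    intro rest tok p nl
    have hc : c ≠ '\n' := fun h => hnl (h ▸ List.mem_cons_self)
    have hcs : '\n' ∉ cs := fun h => hnl (List.mem_cons_of_mem _ h)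
    by_cases hsp : PySem.Chars.isspace c = true
    · cases tok with
      | nil => simpa [pvRunB, pvLineScan, hsp, hc] using ih hcs rest [] p nl
      | cons a t =>
        cases p with
        | true => simp [pvRunB, pvLineScan, hsp, pvStripW]
        | false =>
          have h := ih hcs rest [] (pvAg (a :: t).reverse)
          simpa [pvRunB, pvLineScan, hsp, hc, pv_ag_ofList] using h nl
    · simpa [pvRunB, pvLineScan, hsp] using ih hcs rest (c :: tok) p nl

-- B's loop over a list of '\n'-terminated lines, with the 15-line cap
lemma pv_runB_lines (ls : List (List Char)) :
    ∀ (nl : Nat), nl < 15 → (∀ t ∈ ls, '\n' ∉ t) →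
      pvRunB (ls.flatMap (fun l => l ++ ['\n'])) [] false nl =
        (pvFirstC (ls.take (15 - nl))).map pvStripW := by
  induction ls with
  | nil => intro nl _ _; simp [pvRunB, pvFirstC]
  | cons l rest ih =>
    intro nl hnl hmem
    have hl : '\n' ∉ l := hmem l List.mem_cons_self
    have hrest : ∀ t ∈ rest, '\n' ∉ t := fun t ht => hmem t (List.mem_cons_of_mem _ ht)
    have htake : (l :: rest).take (15 - nl) = l :: rest.take (15 - nl - 1) := by
      have : 15 - nl = (15 - nl - 1) + 1 := by omega
      rw [this, List.take_succ_cons, Nat.add_sub_cancel]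
    rw [List.flatMap_cons, List.append_assoc]
    rw [show ((['\n'] : List Char) ++ rest.flatMap (fun l => l ++ ['\n']))
          = '\n' :: rest.flatMap (fun l => l ++ ['\n']) from rfl]
    rw [pv_runB_line l hl]
    rw [pv_lineScan_eq_scanToks l [] false]
    rw [htake]
    simp only [pvFirstC]
    rw [show PySem.Chars.split₀.go l [] [] = PySem.Chars.split₀ l from rfl]
    cases hscan : pvScanToksC (PySem.Chars.split₀ l) false with
    | some w => simp
    | none =>
      simp only [Option.map]
      by_cases hcap : nl + 1 = 15
      · rw [if_pos hcap]
        have : 15 - nl - 1 = 0 := by omega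
        rw [this, List.take_zero]
        simp [pvFirstC]
      · rw [if_neg hcap]
        rw [ih (nl + 1) (by omega) hrest]
        have : 15 - (nl + 1) = 15 - nl - 1 := by omega
        rw [this]
        cases pvFirstC (rest.take (15 - nl - 1)) <;> rfl

-- every word produced by split() is an infix of the split string
lemma pv_split0_go_mem (t : List Char) :
    ∀ (rest cur : List Char) (acc : List (List Char)),
      t ∈ PySem.Chars.split₀.go rest cur acc → t ∈ acc ∨ t <:+: (cur.reverse ++ rest) := by
  intro rest
  induction rest with
  | nil =>
    intro cur acc h
    simp only [PySem.Chars.split₀.go] at h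
    split_ifs at h with hc
    · exact Or.inl (List.mem_reverse.mp h)
    · rcases List.mem_cons.mp (List.mem_reverse.mp h) with h | h
      · exact Or.inr ⟨[], [], by simp [h]⟩
      · exact Or.inl h
  | cons c rest ih =>
    intro cur acc h
    simp only [PySem.Chars.split₀.go] at h
    split_ifs at h with hsp hc
    · rcases ih [] acc h with h | h
      · exact Or.inl h
      · exact Or.inr (h.trans ⟨cur.reverse ++ [c], [], by simp⟩)
    · rcases ih [] (cur.reverse :: acc) h with h | h
      · rcases List.mem_cons.mp h with h | h
        · exact Or.inr ⟨[], c :: rest, by simp [h]⟩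
        · exact Or.inl h
      · exact Or.inr (h.trans ⟨cur.reverse ++ [c], [], by simp⟩)
    · rcases ih (c :: cur) acc h with h | h
      · exact Or.inl h
      · exact Or.inr (by simpa using h)

lemma pv_split0_infix (t cs : List Char) (h : t ∈ PySem.Chars.split₀ cs) : t <:+: cs := by
  rcases pv_split0_go_mem t cs [] [] h with h | h
  · simp at h
  · simpa using h

-- a line without 'agent' has no agent token
lemma pv_no_agent_token (l t : List Char)
    (h : pvAg l = false) (ht : t ∈ PySem.Chars.split₀ l) : pvAg t = false := by
  rw [Bool.eq_false_iff]
  intro htrue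
  have h1 : "agent".toList <:+: PySem.Chars.lower t :=
    (PySem.Chars.isIn_iff_infix _ _).mp htrue
  have h2 : PySem.Chars.lower t <:+: PySem.Chars.lower l :=
    (pv_split0_infix t l ht).map _
  have h3 : pvAg l = true :=
    (PySem.Chars.isIn_iff_infix _ _).mpr (h1.trans h2)
  rw [h] at h3
  exact Bool.false_ne_true h3

lemma pv_pairScan_none (ts : List (List Char)) (h : ∀ t ∈ ts, pvAg t = false) :
    pvPairScanC ts = none := by
  induction ts with
  | nil => simp [pvPairScanC]
  | cons t ts ih =>
    cases ts with
    | nil => simp [pvPairScanC]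
    | cons q rest =>
      simp only [pvPairScanC, h t List.mem_cons_self, Bool.false_eq_true, if_false]
      exact ih fun x hx => h x (List.mem_cons_of_mem _ hx)

-- A's inner loop = the pair scan (String level)
lemma pv_innerA_eq_pairScan (parts : List String) :
    ∀ (rem : List String) (i : Nat), parts.drop i = rem → i + rem.length = parts.length →
      pvInnerA parts i rem = (pvPairScan rem).map (fun w => PySem.Str.stripChars w ".,!?") := by
  intro rem
  induction rem with
  | nil => intro i _ _; simp [pvInnerA, pvPairScan]
  | cons part rest ih =>
    intro i hdrop hlen
    have hdrop1 : parts.drop (i + 1) = rest := by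
      rw [← List.tail_drop, hdrop, List.tail_cons]
    match rest with
    | [] =>
      have hi : ¬ (i + 1 < parts.length) := by simp at hlen; omega
      simp [pvInnerA, pvPairScan, hi]
    | q :: rest' =>
      have hi : i + 1 < parts.length := by simp at hlen; omega
      have hget : PySem.List.pyGet? parts ((i : Int) + 1) = some q := by
        have hc : ((i : Int) + 1) = ((i + 1 : Nat) : Int) := by push_cast; ring
        rw [hc, PySem.List.pyGet?_natCast]
        have h0 : (parts.drop (i + 1))[(0 : Nat)]? = parts[i + 1 + 0]? := List.getElem?_drop
        rw [hdrop1] at h0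
        simpa using h0.symm
      by_cases hag : PySem.Str.isIn "agent" (PySem.Str.lower part) = true
      · simp only [pvInnerA, pvPairScan, hag, hi]
        simp [hget]
      · rw [Bool.not_eq_true] at hag
        simp only [pvInnerA, pvPairScan, hag, Bool.false_and, Bool.false_eq_true, if_false]
        exact ih (i + 1) hdrop1 (by simp at hlen ⊢; omega)

lemma pv_pairScan_map (ts : List (List Char)) :
    pvPairScan (ts.map String.ofList) = (pvPairScanC ts).map String.ofList := by
  induction ts with
  | nil => simp [pvPairScan, pvPairScanC]
  | cons t ts ih =>
    cases ts with
    | nil => simp [pvPairScan, pvPairScanC]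
    | cons q rest =>
      simp only [List.map_cons, pvPairScan, pvPairScanC, pv_ag_ofList]
      cases h : pvAg t with
      | true => simp
      | false => simpa [h] using ih

-- A's outer loop over lines given as char lists
lemma pv_outerA_eq_firstC (cls : List (List Char)) :
    pvOuterA (cls.map String.ofList) =
      match pvFirstC cls with
      | some w => pvStripW w
      | none => "Unknown" := by
  induction cls with
  | nil => simp [pvOuterA, pvFirstC]
  | cons l rest ih =>
    have hsplit : PySem.Str.split₀ (String.ofList l) =
        (PySem.Chars.split₀ l).map String.ofList := by
      simp [PySem.Str.split₀]
    have hinner : pvInnerA (PySem.Str.split₀ (String.ofList l)) 0 (PySem.Str.split₀ (String.ofList l))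
        = ((pvPairScanC (PySem.Chars.split₀ l)).map String.ofList).map
            (fun w => PySem.Str.stripChars w ".,!?") := by
      rw [pv_innerA_eq_pairScan _ _ 0 (by simp) (by simp), hsplit, pv_pairScan_map]
    simp only [List.map_cons, pvOuterA, pvFirstC]
    rw [pv_scanToks_eq_pairScan (PySem.Chars.split₀ l) false]
    simp only [Bool.false_eq_true, if_false]
    by_cases hag : pvAg l = true
    · rw [if_pos (by rw [pv_ag_ofList]; exact hag)]
      rw [hinner]
      cases hp : pvPairScanC (PySem.Chars.split₀ l) with
      | some w => simp [pvStripW]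
      | none => simpa using ih
    · rw [Bool.not_eq_true] at hag
      rw [if_neg (by rw [pv_ag_ofList, hag]; simp)]
      have hnone : pvPairScanC (PySem.Chars.split₀ l) = none :=
        pv_pairScan_none _ (fun t ht => pv_no_agent_token l t hag ht)
      rw [hnone, ih]

-- ===== VERDICT (by name: the statement is the Claim_ definition above) =====
theorem extract_agent_used_spec : Claim_equal_extract_agent_used := by
  intro content _
  unfold Spec_extract_agent_used extract_agent_used extract_agent_used_alt
  have hsplit : (PySem.Str.split? content "\n").getD []
      = (pvSplitNL content.toList).map String.ofList := by
    simp only [PySem.Str.split?, PySem.Chars.split?]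
    rw [if_neg (by simp)]
    rw [show ("\n" : String).toList = ['\n'] from rfl, pv_splitOn_nl]
    rfl
  have hslice : PySem.List.slice ((pvSplitNL content.toList).map String.ofList) none (some 15)
      = ((pvSplitNL content.toList).take 15).map String.ofList := by
    rw [PySem.List.slice_to _ (by norm_num)]
    simp [List.map_take]
  rw [hsplit, hslice, pv_outerA_eq_firstC]
  have hflat : content.toList ++ ['\n']
      = (pvSplitNL content.toList).flatMap (fun l => l ++ ['\n']) :=
    (pvSplitNL_flat content.toList).symm
  rw [hflat, pv_runB_lines _ 0 (by norm_num) (pvSplitNL_no_nl content.toList)]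
  simp only [Nat.sub_zero]
  cases h : pvFirstC ((pvSplitNL content.toList).take 15) <;> simp [*]
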